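-- pv_equiv track=rewrite | github.com/arnor-sigurdsson/EIR | eir/interpretation/interpret_sequence.py | get_sequence_index_to_truncate_unknown
-- ===== SOURCE A (Python) =====
-- from typing import TYPE_CHECKING, Dict, Iterable, Mapping, Sequence, Tuple
--
-- def get_sequence_index_to_truncate_unknown(
--     raw_inputs: Sequence[str], padding_value: str = "<pad>"
-- ) -> int:
--     raw_inputs_reversed = raw_inputs[::-1]
--     counter = 0
--     for element in raw_inputs_reversed:
--         if element == padding_value:
--             counter += 1
--         else:
--             break
--
--     index_to_truncate = len(raw_inputs) - counter
--
--     return index_to_truncate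
-- ===== SOURCE B (Python) =====
-- def get_sequence_index_to_truncate_unknown(raw_inputs, padding_value="<pad>"):
--     index_to_truncate = 0
--     for i, element in enumerate(raw_inputs):
--         if element != padding_value:
--             index_to_truncate = i + 1
--     return index_to_truncate
-- ===== Notes on version B (the rewrite author's own statement) =====
-- stated objective: simpler
-- what changed: Single forward pass tracking the position just past the last non-padding element, instead of building a reversed copy and counting leading pads with an early break.
import Mathlib
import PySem

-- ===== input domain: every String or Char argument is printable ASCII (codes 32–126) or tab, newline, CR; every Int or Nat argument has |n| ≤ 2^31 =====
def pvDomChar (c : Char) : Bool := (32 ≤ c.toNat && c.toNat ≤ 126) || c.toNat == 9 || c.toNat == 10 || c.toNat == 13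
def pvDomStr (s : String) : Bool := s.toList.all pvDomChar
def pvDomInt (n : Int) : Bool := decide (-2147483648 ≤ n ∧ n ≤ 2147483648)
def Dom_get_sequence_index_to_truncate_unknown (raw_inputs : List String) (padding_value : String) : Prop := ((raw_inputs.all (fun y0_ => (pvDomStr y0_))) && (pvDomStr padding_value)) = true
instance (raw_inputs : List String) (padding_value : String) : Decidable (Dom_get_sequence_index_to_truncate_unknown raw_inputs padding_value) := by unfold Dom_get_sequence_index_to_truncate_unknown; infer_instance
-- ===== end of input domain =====

-- B replaces A's reversed-copy + break loop with a single forward pass tracking the index just past the last non-pad element (simpler decomposition, same cost).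


-- ===== PORT A =====
-- counter loop over the reversed list, with early break at the first non-pad
def pvCountPadA (elems : List String) (padding_value : String) : Int :=
  match elems with
  | [] => 0
  | x :: xs => if x == padding_value then 1 + pvCountPadA xs padding_value else 0

def get_sequence_index_to_truncate_unknown (raw_inputs : List String) (padding_value : String) : Int :=
  (raw_inputs.length : Int) - pvCountPadA ((PySem.List.slice? raw_inputs none none (-1)).getD []) padding_value

-- ===== PORT B =====
-- forward pass: keep the index just past the last non-pad element seen so far
def pvForwardB (elems : List String) (padding_value : String) (i acc : Int) : Int :=
  match elems with
  | [] => acc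
  | x :: xs => pvForwardB xs padding_value (i + 1) (if x ≠ padding_value then i + 1 else acc)

def get_sequence_index_to_truncate_unknown_alt (raw_inputs : List String) (padding_value : String) : Int :=
  pvForwardB raw_inputs padding_value 0 0

-- ===== PRECONDITION & SPEC =====
def Spec_get_sequence_index_to_truncate_unknown (raw_inputs : List String) (padding_value : String) (out : Int) : Prop := out = get_sequence_index_to_truncate_unknown_alt raw_inputs padding_value
instance (raw_inputs : List String) (padding_value : String) (out : Int) : Decidable (Spec_get_sequence_index_to_truncate_unknown raw_inputs padding_value out) := by unfold Spec_get_sequence_index_to_truncate_unknown; infer_instance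

-- ===== CLAIM (what is proved, stated in full; the proofs are below) =====
def Claim_equal_get_sequence_index_to_truncate_unknown : Prop := ∀ (raw_inputs : List String) (padding_value : String), Dom_get_sequence_index_to_truncate_unknown raw_inputs padding_value → Spec_get_sequence_index_to_truncate_unknown raw_inputs padding_value (get_sequence_index_to_truncate_unknown raw_inputs padding_value)

-- ===== LEMMAS AND PROOFS =====

-- ===== VERDICT (by name: the statement is the Claim_ definition above) =====
lemma pvCountPadA_snoc (xs : List String) (x p : String) :
    pvCountPadA ((xs ++ [x]).reverse) p
      = if x == p then 1 + pvCountPadA xs.reverse p else 0 := by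
  simp [pvCountPadA]

lemma pvForwardB_snoc (xs : List String) (x p : String) (i acc : Int) :
    pvForwardB (xs ++ [x]) p i acc
      = if x ≠ p then i + xs.length + 1 else pvForwardB xs p i acc := by
  induction xs generalizing i acc with
  | nil => simp [pvForwardB]
  | cons y ys ih =>
    simp only [List.cons_append, pvForwardB, ih, List.length_cons]
    split_ifs <;> push_cast <;> ring_nf

lemma pv_main (xs : List String) (p : String) :
    (xs.length : Int) - pvCountPadA xs.reverse p = pvForwardB xs p 0 0 := by
  induction xs using List.reverseRecOn with
  | nil => simp [pvCountPadA, pvForwardB]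
  | append_singleton ys x ih =>
    rw [pvCountPadA_snoc, pvForwardB_snoc]
    by_cases h : x = p
    · simp only [h, beq_self_eq_true, if_true, ne_eq, not_true_eq_false, if_false, ← ih,
        List.length_append, List.length_cons, List.length_nil]
      push_cast; ring
    · simp only [h, beq_iff_eq, ne_eq, not_false_eq_true, if_true,
        List.length_append, List.length_cons, List.length_nil]
      push_cast; ring

-- ===== VERDICT =====
theorem get_sequence_index_to_truncate_unknown_spec : Claim_equal_get_sequence_index_to_truncate_unknown := by
  intro raw_inputs padding_value _
  unfold Spec_get_sequence_index_to_truncate_unknown get_sequence_index_to_truncate_unknown get_sequence_index_to_truncate_unknown_alt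
  rw [PySem.List.slice?_none_none_neg_one]
  simp only [Option.getD_some]
  exact pv_main raw_inputs padding_value
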